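-- pv_equiv track=rewrite | github.com/jiangyi15/tf-pwa | tf_pwa/amplitude.py | GetMinL
-- ===== SOURCE A (Python) =====
-- def GetMinL(J1,J2,J3,P1,P2,P3):
--   dl = not (P1*P2*P3==1)
--   s_min = abs(J2-J3)
--   s_max = J2+J3
--   minL = 10000
--   for s in range(s_min,s_max+1,1):
--     for l in range(abs(J1-s),J1+s+1,1):
--       if l%2==dl:
--         minL = min(l,minL)
--   return minL
-- ===== SOURCE B (Python) =====
-- def GetMinL(J1, J2, J3, P1, P2, P3):
--     # For each allowed coupled spin s, the smallest orbital L with the required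
--     # parity in [|J1-s|, J1+s] is computed directly, removing A's inner scan.
--     dl = 0 if P1 * P2 * P3 == 1 else 1
--     minL = 10000
--     for s in range(abs(J2 - J3), J2 + J3 + 1):
--         a = abs(J1 - s)
--         b = J1 + s
--         c = a if a % 2 == dl else a + 1
--         if c <= b and c < minL:
--             minL = c
--     return minL
-- ===== Notes on version B (the rewrite author's own statement) =====
-- stated objective: faster
-- what changed: The inner scan over all L in range(|J1-s|, J1+s+1) is replaced by an O(1) parity computation of the smallest admissible L for each s, leaving a single loop over s.
import Mathlib
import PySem

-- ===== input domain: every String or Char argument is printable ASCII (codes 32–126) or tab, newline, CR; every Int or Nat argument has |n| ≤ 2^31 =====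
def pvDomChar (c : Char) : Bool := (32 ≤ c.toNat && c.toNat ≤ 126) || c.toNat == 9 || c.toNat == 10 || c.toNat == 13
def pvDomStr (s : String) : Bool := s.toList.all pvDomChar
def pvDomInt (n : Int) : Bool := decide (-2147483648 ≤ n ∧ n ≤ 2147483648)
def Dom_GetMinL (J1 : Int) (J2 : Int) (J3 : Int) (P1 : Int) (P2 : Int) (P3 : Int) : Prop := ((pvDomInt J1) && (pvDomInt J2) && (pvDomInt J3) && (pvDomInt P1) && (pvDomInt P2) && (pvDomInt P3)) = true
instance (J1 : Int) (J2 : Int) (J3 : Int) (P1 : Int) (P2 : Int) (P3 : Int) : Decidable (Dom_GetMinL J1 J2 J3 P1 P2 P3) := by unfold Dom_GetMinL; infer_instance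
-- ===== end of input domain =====

-- B replaces A's inner scan over all L by an O(1) parity computation of the
-- smallest admissible L for each coupled spin s (objective: faster, one loop
-- instead of two nested loops).

-- ===== PORT A =====
def GetMinL (J1 : Int) (J2 : Int) (J3 : Int) (P1 : Int) (P2 : Int) (P3 : Int) : Int :=
  let dl : Bool := !(P1 * P2 * P3 == 1)
  let sMin : Int := |J2 - J3|
  let sMax : Int := J2 + J3
  (PySem.List.pyRange sMin (sMax + 1) 1).foldl
    (fun minL s =>
      (PySem.List.pyRange |J1 - s| (J1 + s + 1) 1).foldl
        (fun m l => if PySem.Int.mod l 2 == (if dl then (1:Int) else 0) then min l m else m)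
        minL)
    10000

-- ===== PORT B =====
def GetMinL_alt (J1 : Int) (J2 : Int) (J3 : Int) (P1 : Int) (P2 : Int) (P3 : Int) : Int :=
  let dl : Int := if P1 * P2 * P3 == 1 then 0 else 1
  (PySem.List.pyRange |J2 - J3| (J2 + J3 + 1) 1).foldl
    (fun minL s =>
      let a := |J1 - s|
      let b := J1 + s
      let c := if PySem.Int.mod a 2 == dl then a else a + 1
      if c ≤ b ∧ c < minL then c else minL)
    10000

-- ===== PRECONDITION & SPEC =====
def Spec_GetMinL (J1 : Int) (J2 : Int) (J3 : Int) (P1 : Int) (P2 : Int) (P3 : Int) (out : Int) : Prop := out = GetMinL_alt J1 J2 J3 P1 P2 P3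
instance (J1 : Int) (J2 : Int) (J3 : Int) (P1 : Int) (P2 : Int) (P3 : Int) (out : Int) : Decidable (Spec_GetMinL J1 J2 J3 P1 P2 P3 out) := by unfold Spec_GetMinL; infer_instance

-- ===== CLAIM (what is proved, stated in full; the proofs are below) =====
def Claim_equal_GetMinL : Prop := ∀ (J1 : Int) (J2 : Int) (J3 : Int) (P1 : Int) (P2 : Int) (P3 : Int), Dom_GetMinL J1 J2 J3 P1 P2 P3 → Spec_GetMinL J1 J2 J3 P1 P2 P3 (GetMinL J1 J2 J3 P1 P2 P3)

-- ===== LEMMAS AND PROOFS =====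

-- A's inner loop over l ∈ range(a, b+1) equals the parity closed form:
-- the smallest l ≥ a with (Python) l % 2 = dl is c = a or a+1, and the loop
-- contributes min c m when c ≤ b, else leaves m unchanged.
lemma inner_loop (dl : Int) (hdl : dl = 0 ∨ dl = 1) :
    ∀ (n : Nat) (a b m : Int), 0 ≤ a → (b + 1 - a).toNat = n →
    (PySem.List.pyRange a (b + 1) 1).foldl
      (fun m l => if PySem.Int.mod l 2 == dl then min l m else m) m
    = (if (if PySem.Int.mod a 2 == dl then a else a + 1) ≤ b
       then min (if PySem.Int.mod a 2 == dl then a else a + 1) m else m) := by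
  intro n
  induction n with
  | zero =>
    intro a b m ha hn
    rw [PySem.List.pyRange_one_eq_nil (by omega)]
    simp only [List.foldl_nil]
    split_ifs with h1 h2 <;> first | rfl | omega
  | succ n ih =>
    intro a b m ha hn
    rw [PySem.List.pyRange_one_cons (by omega), List.foldl_cons,
        ih (a + 1) b _ (by omega) (by omega)]
    rw [PySem.Int.mod_eq_emod_of_pos (a := a) (by norm_num : (0:Int) < 2),
        PySem.Int.mod_eq_emod_of_pos (a := a + 1) (by norm_num : (0:Int) < 2)]
    have hpa : a % 2 = 0 ∨ a % 2 = 1 := by omega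
    have hpa1 : (a + 1) % 2 = 1 - a % 2 := by omega
    simp only [beq_iff_eq]
    by_cases hp : a % 2 = dl
    · have hnp : ¬ (a + 1) % 2 = dl := by omega
      simp only [hp, if_neg hnp]
      simp only [min_def]
      split_ifs <;> omega
    · have hyp : (a + 1) % 2 = dl := by omega
      simp only [if_neg hp, hyp]
      simp

-- ===== VERDICT (by name: the statement is the Claim_ definition above) =====
theorem GetMinL_spec : Claim_equal_GetMinL := by
  intro J1 J2 J3 P1 P2 P3 _
  unfold Spec_GetMinL GetMinL GetMinL_alt
  simp only []
  have hdleq : (if (!(P1 * P2 * P3 == 1)) = true then (1:Int) else 0)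
      = (if P1 * P2 * P3 == 1 then (0:Int) else 1) := by
    cases h : (P1 * P2 * P3 == 1) <;> simp
  set dl : Int := if P1 * P2 * P3 == 1 then (0:Int) else 1 with hdl_def
  have hdl : dl = 0 ∨ dl = 1 := by
    rw [hdl_def]; split_ifs <;> simp
  rw [hdleq]
  apply PySem.List.foldl_congr_mem
  intro m s _
  rw [inner_loop dl hdl ((J1 + s + 1) - |J1 - s|).toNat |J1 - s| (J1 + s) m
        (abs_nonneg _) rfl]
  set c : Int := if PySem.Int.mod |J1 - s| 2 == dl then |J1 - s| else |J1 - s| + 1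
  simp only [min_def]
  split_ifs <;> omega
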